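-- pv_equiv track=rewrite | github.com/poigit/m6ATM | src/m6atm/preprocess/ResquiggleUtils.py | to_cigar
-- ===== SOURCE A (Python) =====
-- def to_cigar(traceback, seq_len):
--
--     n_prev = -1
--     m_prev = -1
--     cnt_total = 0
--     cigar_list = []
--     count_del = 0
--     count_match_mismatch = 0
--     init = True
--
--     for n, m in traceback:
--         if init:
--             if n>0:
--                 cigar_list.append(str(n) + 'N')
--             init = False
--
--         if m == m_prev:  # deletion
--             count_del+=1
--             if (count_match_mismatch>0):
--                 if (cnt_total+count_match_mismatch)>seq_len:
--                     mm = seq_len-cnt_total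
--                 else:
--                     mm = count_match_mismatch
--                 cnt_total += mm
--                 cigar_list.append(str(mm) + 'M')
--
--             count_match_mismatch = 0
--
--         else:  # match or mismatch
--             count_match_mismatch += 1
--             if (count_del > 0):
--                 cigar_list.append(str(count_del) + 'D')
--             count_del = 0
--         m_prev = m
--
--     if (count_match_mismatch > 0):
--         if (cnt_total + count_match_mismatch) > seq_len:
--             mm = seq_len - cnt_total
--         else:
--             mm = count_match_mismatch
--         cnt_total += mm
--         cigar_list.append(str(mm) + 'M')
--     if (count_del > 0):
--         cigar_list.append(str(count_del) + 'D')
--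
--     cigar_string = ''.join(cigar_list)
--
--     return cigar_string
-- ===== SOURCE B (Python) =====
-- def to_cigar(traceback, seq_len):
--     if not traceback:
--         return ''
--     parts = []
--     if traceback[0][0] > 0:
--         parts.append(str(traceback[0][0]) + 'N')
--     # pass 1: classify every element as match/mismatch ('M') or deletion ('D')
--     prev = -1
--     syms = []
--     for _, m in traceback:
--         syms.append('M' if m != prev else 'D')
--         prev = m
--     # pass 2: run-length encode the symbol list
--     groups = []
--     for c in syms:
--         if groups and groups[-1][0] == c:
--             groups[-1] = (c, groups[-1][1] + 1)
--         else:
--             groups.append((c, 1))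
--     # pass 3: emit one CIGAR token per run, capping total 'M' at seq_len
--     total = 0
--     for c, length in groups:
--         if c == 'D':
--             parts.append(str(length) + 'D')
--         else:
--             mm = min(length, seq_len - total)
--             total += mm
--             parts.append(str(mm) + 'M')
--     return ''.join(parts)
-- ===== Notes on version B (the rewrite author's own statement) =====
-- stated objective: idiomatic
-- what changed: Replaced A's single interleaved loop with six pieces of mutable state (pending M/D counters flushed at transitions and again after the loop) by three plain passes: classify each element as 'M'/'D', run-length-encode the symbol list, then emit one token per run with min() capping total matches at seq_len.
import Mathlib
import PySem

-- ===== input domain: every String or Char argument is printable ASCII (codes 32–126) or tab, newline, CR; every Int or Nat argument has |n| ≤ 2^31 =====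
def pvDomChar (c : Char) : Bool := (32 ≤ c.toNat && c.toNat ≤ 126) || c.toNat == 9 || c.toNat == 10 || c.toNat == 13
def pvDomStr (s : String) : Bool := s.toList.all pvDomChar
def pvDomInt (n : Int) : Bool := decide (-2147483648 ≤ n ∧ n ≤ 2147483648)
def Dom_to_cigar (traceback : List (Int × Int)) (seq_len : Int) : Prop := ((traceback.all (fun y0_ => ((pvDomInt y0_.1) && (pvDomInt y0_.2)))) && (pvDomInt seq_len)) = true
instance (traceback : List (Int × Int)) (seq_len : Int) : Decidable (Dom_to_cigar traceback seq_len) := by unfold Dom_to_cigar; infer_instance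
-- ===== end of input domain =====

-- B re-implements A's interleaved flush-at-transition loop as three plain passes
-- (classify, run-length-encode, emit); same return value everywhere, no speed claim.

-- ===== PORT A =====
-- loop body of A's for-loop, state = (m_prev, cnt_total, cigar_list, count_del, count_match_mismatch, init)
def pvAStep (seq_len : Int) (st : Int × Int × List String × Int × Int × Bool) (nm : Int × Int) :
    Int × Int × List String × Int × Int × Bool :=
  let m_prev := st.1
  let cnt_total := st.2.1
  let cigar_list := st.2.2.1
  let count_del := st.2.2.2.1
  let count_mm := st.2.2.2.2.1
  let init := st.2.2.2.2.2
  let n := nm.1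
  let m := nm.2
  let cigar_list := if init then (if n > 0 then cigar_list ++ [PySem.Int.toStr n ++ "N"] else cigar_list) else cigar_list
  if m == m_prev then
    let count_del := count_del + 1
    if count_mm > 0 then
      let mm := if cnt_total + count_mm > seq_len then seq_len - cnt_total else count_mm
      (m, cnt_total + mm, cigar_list ++ [PySem.Int.toStr mm ++ "M"], count_del, 0, false)
    else (m, cnt_total, cigar_list, count_del, 0, false)
  else
    let count_mm := count_mm + 1
    if count_del > 0 then
      (m, cnt_total, cigar_list ++ [PySem.Int.toStr count_del ++ "D"], 0, count_mm, false)
    else (m, cnt_total, cigar_list, 0, count_mm, false)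

-- the two post-loop flushes of A, state = (cnt_total, cigar_list, count_del, count_mm)
def pvAFinal (seq_len : Int) (st : Int × List String × Int × Int) : List String :=
  let cnt_total := st.1
  let cigar_list := st.2.1
  let count_del := st.2.2.1
  let count_mm := st.2.2.2
  let cigar_list := if count_mm > 0 then
      (let mm := if cnt_total + count_mm > seq_len then seq_len - cnt_total else count_mm
       cigar_list ++ [PySem.Int.toStr mm ++ "M"])
    else cigar_list
  if count_del > 0 then cigar_list ++ [PySem.Int.toStr count_del ++ "D"] else cigar_list

def to_cigar (traceback : List (Int × Int)) (seq_len : Int) : String :=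
  let st := traceback.foldl (pvAStep seq_len) ((-1 : Int), (0 : Int), ([] : List String), (0 : Int), (0 : Int), true)
  String.join (pvAFinal seq_len (st.2.1, st.2.2.1, st.2.2.2.1, st.2.2.2.2.1))

-- ===== PORT B =====
-- pass 1 body: classify one element, acc = (prev, syms)
def pvBSym (acc : Int × List Char) (nm : Int × Int) : Int × List Char :=
  (nm.2, acc.2 ++ [if nm.2 != acc.1 then 'M' else 'D'])

-- pass 2 body: extend the last run or start a new one
def pvBGroup (groups : List (Char × Int)) (c : Char) : List (Char × Int) :=
  match groups.getLast? with
  | some g => if g.1 == c then groups.dropLast ++ [(c, g.2 + 1)] else groups ++ [(c, 1)]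
  | none => [(c, 1)]

-- pass 3 body: emit one CIGAR token per run, acc = (total, parts)
def pvBEmit (seq_len : Int) (acc : Int × List String) (g : Char × Int) : Int × List String :=
  if g.1 == 'D' then (acc.1, acc.2 ++ [PySem.Int.toStr g.2 ++ "D"])
  else
    let mm := min g.2 (seq_len - acc.1)
    (acc.1 + mm, acc.2 ++ [PySem.Int.toStr mm ++ "M"])

def to_cigar_alt (traceback : List (Int × Int)) (seq_len : Int) : String :=
  match traceback with
  | [] => ""
  | (n0, _) :: _ =>
    let parts0 : List String := if n0 > 0 then [PySem.Int.toStr n0 ++ "N"] else []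
    let syms := (traceback.foldl pvBSym ((-1 : Int), ([] : List Char))).2
    let groups := syms.foldl pvBGroup ([] : List (Char × Int))
    String.join (groups.foldl (pvBEmit seq_len) ((0 : Int), parts0)).2

-- ===== PRECONDITION & SPEC =====
def Spec_to_cigar (traceback : List (Int × Int)) (seq_len : Int) (out : String) : Prop := out = to_cigar_alt traceback seq_len
instance (traceback : List (Int × Int)) (seq_len : Int) (out : String) : Decidable (Spec_to_cigar traceback seq_len out) := by unfold Spec_to_cigar; infer_instance

-- ===== CLAIM (what is proved, stated in full; the proofs are below) =====
def Claim_equal_to_cigar : Prop := ∀ (traceback : List (Int × Int)) (seq_len : Int), Dom_to_cigar traceback seq_len → Spec_to_cigar traceback seq_len (to_cigar traceback seq_len)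

-- ===== LEMMAS AND PROOFS =====

-- proof-side spec functions
def symsF : Int → List (Int × Int) → List Char
  | _, [] => []
  | prev, nm :: rest => (if nm.2 != prev then 'M' else 'D') :: symsF nm.2 rest

def runsAux (c : Char) (k : Int) : List Char → List (Char × Int)
  | [] => [(c, k)]
  | d :: rest => if d == c then runsAux c (k + 1) rest else (c, k) :: runsAux d 1 rest

-- A's loop body with m_prev and init projected away, driven by the symbol
def pvCStep (seq_len : Int) (st : Int × List String × Int × Int) (c : Char) : Int × List String × Int × Int :=
  if c == 'D' then
    let del := st.2.2.1 + 1
    if st.2.2.2 > 0 then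
      let mm := if st.1 + st.2.2.2 > seq_len then seq_len - st.1 else st.2.2.2
      (st.1 + mm, st.2.1 ++ [PySem.Int.toStr mm ++ "M"], del, 0)
    else (st.1, st.2.1, del, 0)
  else
    let mmc := st.2.2.2 + 1
    if st.2.2.1 > 0 then (st.1, st.2.1 ++ [PySem.Int.toStr st.2.2.1 ++ "D"], 0, mmc)
    else (st.1, st.2.1, 0, mmc)

lemma symFold (tb : List (Int × Int)) : ∀ (prev : Int) (l : List Char),
    (tb.foldl pvBSym (prev, l)).2 = l ++ symsF prev tb := by
  induction tb with
  | nil => intro prev l; simp [symsF]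
  | cons nm rest ih =>
      intro prev l
      simp only [List.foldl_cons, pvBSym, symsF, ih, List.append_assoc, List.singleton_append]

lemma groupFold (xs : List Char) : ∀ (pre : List (Char × Int)) (c : Char) (k : Int),
    xs.foldl pvBGroup (pre ++ [(c, k)]) = pre ++ runsAux c k xs := by
  induction xs with
  | nil => intro pre c k; simp [runsAux]
  | cons d rest ih =>
      intro pre c k
      by_cases hdc : d = c
      · subst hdc
        simp only [List.foldl_cons, pvBGroup, List.getLast?_concat, runsAux,
          List.dropLast_concat, beq_self_eq_true, if_true, ih]
      · have h1 : (c == d) = false := by simp [hdc, Ne.symm]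
        have h2 : (d == c) = false := by simp [hdc]
        simp only [List.foldl_cons, pvBGroup, List.getLast?_concat, runsAux, h1, h2,
          if_false, Bool.false_eq_true]
        rw [show pre ++ [(c, k)] ++ [(d, 1)] = (pre ++ [(c, k)]) ++ [(d, 1)] by simp, ih]
        simp

lemma aFoldProj (seq_len : Int) (tb : List (Int × Int)) :
    ∀ (mp cnt : Int) (parts : List String) (del mm : Int),
    (let st := tb.foldl (pvAStep seq_len) (mp, cnt, parts, del, mm, false)
     ((st.2.1, st.2.2.1, st.2.2.2.1, st.2.2.2.2.1) : Int × List String × Int × Int))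
      = (symsF mp tb).foldl (pvCStep seq_len) (cnt, parts, del, mm) := by
  induction tb with
  | nil => intro mp cnt parts del mm; simp [symsF]
  | cons nm rest ih =>
      intro mp cnt parts del mm
      by_cases hm : nm.2 = mp
      · have hb : (nm.2 == mp) = true := by simp [hm]
        have hb' : (nm.2 != mp) = false := by simp [hm]
        simp only [List.foldl_cons, symsF, hb', if_false, Bool.false_eq_true]
        simp only [pvAStep, hb, if_true, pvCStep]
        by_cases hc : mm > 0 <;> simp [hc, ih]
      · have hb : (nm.2 == mp) = false := by simp [hm]
        have hb' : (nm.2 != mp) = true := by simp [hm]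
        simp only [List.foldl_cons, symsF, hb', if_true]
        simp only [pvAStep, hb, Bool.false_eq_true, if_false, pvCStep]
        have : ('M' == 'D') = false := by decide
        by_cases hc : del > 0 <;> simp [hc, ih, this]

lemma minEq (seq_len cnt k : Int) :
    min k (seq_len - cnt) = if cnt + k > seq_len then seq_len - cnt else k := by
  split_ifs <;> omega

lemma symsF_DM : ∀ (prev : Int) (tb : List (Int × Int)) (c : Char),
    c ∈ symsF prev tb → c = 'D' ∨ c = 'M' := by
  intro prev tb
  induction tb generalizing prev with
  | nil => intro c hc; simp [symsF] at hc
  | cons nm rest ih =>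
      intro c hc
      simp only [symsF, List.mem_cons] at hc
      rcases hc with hc | hc
      · subst hc; split_ifs <;> simp
      · exact ih nm.2 c hc

lemma mainRun (seq_len : Int) (xs : List Char)
    (hall : ∀ c ∈ xs, c = 'D' ∨ c = 'M') :
    ∀ (k cnt : Int) (parts : List String), 1 ≤ k →
    (pvAFinal seq_len ((xs.foldl (pvCStep seq_len) (cnt, parts, k, 0))) =
       ((runsAux 'D' k xs).foldl (pvBEmit seq_len) (cnt, parts)).2)
    ∧ (pvAFinal seq_len ((xs.foldl (pvCStep seq_len) (cnt, parts, 0, k))) =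
       ((runsAux 'M' k xs).foldl (pvBEmit seq_len) (cnt, parts)).2) := by
  induction xs with
  | nil =>
      intro k cnt parts hk
      constructor
      · simp [pvAFinal, runsAux, pvBEmit, show (0:Int) < k by omega]
      · simp [pvAFinal, runsAux, pvBEmit, show (0:Int) < k by omega, ← minEq]
  | cons d rest ih =>
      intro k cnt parts hk
      have hrest : ∀ c ∈ rest, c = 'D' ∨ c = 'M' := fun c hc => hall c (List.mem_cons_of_mem _ hc)
      have ih' := ih hrest
      rcases hall d (List.mem_cons_self) with hd | hd
      · subst hd
        constructor
        · -- pending D run meets another 'D'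
          simp only [List.foldl_cons, pvCStep, beq_self_eq_true, if_true, runsAux,
            show ¬ ((0:Int) > 0) by omega, if_false]
          have := (ih' (k + 1) cnt parts (by omega)).1
          simpa using this
        · -- pending M run meets a 'D': flush the M run
          simp only [List.foldl_cons, pvCStep, beq_self_eq_true, if_true, runsAux,
            if_pos (show k > 0 by omega),
            show ('D' == 'M') = false by decide, Bool.false_eq_true, if_false]
          simp only [pvBEmit, show ('M' == 'D') = false by decide,
            Bool.false_eq_true, if_false, ← minEq]
          have := (ih' 1 (cnt + min k (seq_len - cnt))
            (parts ++ [PySem.Int.toStr (min k (seq_len - cnt)) ++ "M"]) (by omega)).1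
          simpa [← minEq] using this
      · subst hd
        have h1 : ('M' == 'D') = false := by decide
        constructor
        · -- pending D run meets an 'M': flush the D run
          simp only [List.foldl_cons, pvCStep, h1, Bool.false_eq_true, if_false, runsAux,
            if_pos (show k > 0 by omega)]
          simp only [pvBEmit, show ('D' == 'D') = true by decide, if_true]
          have := (ih' 1 cnt (parts ++ [PySem.Int.toStr k ++ "D"]) (by omega)).2
          simpa using this
        · -- pending M run meets another 'M'
          simp only [List.foldl_cons, pvCStep, h1, Bool.false_eq_true, if_false, runsAux,
            beq_self_eq_true, if_true, show ¬ ((0:Int) > 0) by omega]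
          have := (ih' (k + 1) cnt parts (by omega)).2
          simpa using this

-- ===== VERDICT (by name: the statement is the Claim_ definition above) =====
theorem to_cigar_spec : Claim_equal_to_cigar := by
  intro tb seq_len _
  unfold Spec_to_cigar
  cases tb with
  | nil => rfl
  | cons nm rest =>
      obtain ⟨n, m⟩ := nm
      have hsym : (List.foldl pvBSym (pvBSym ((-1 : Int), ([] : List Char)) (n, m)) rest).2
          = symsF (-1) ((n, m) :: rest) := by
        rw [← List.foldl_cons]; exact symFold ((n, m) :: rest) (-1) []
      by_cases hm : m = -1
      · have hb : (m == (-1 : Int)) = true := by simp [hm]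
        have hb' : (m != (-1 : Int)) = false := by simp [hm]
        have hstep : pvAStep seq_len ((-1 : Int), (0 : Int), ([] : List String), (0 : Int), (0 : Int), true) (n, m)
            = (m, 0, (if n > 0 then [PySem.Int.toStr n ++ "N"] else []), 1, 0, false) := by
          simp [pvAStep, hb]
        have hruns : (symsF (-1) ((n, m) :: rest)).foldl pvBGroup ([] : List (Char × Int))
            = runsAux 'D' 1 (symsF m rest) := by
          simp only [symsF, hb', Bool.false_eq_true, if_false, List.foldl_cons, pvBGroup,
            List.getLast?_nil]
          simpa using groupFold (symsF m rest) [] 'D' 1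
        have hproj := aFoldProj seq_len rest m 0 (if n > 0 then [PySem.Int.toStr n ++ "N"] else []) 1 0
        have hmain := (mainRun seq_len (symsF m rest) (symsF_DM m rest) 1 0
          (if n > 0 then [PySem.Int.toStr n ++ "N"] else []) (by omega)).1
        simp only [to_cigar, to_cigar_alt, List.foldl_cons, hstep]
        simp only at hproj
        rw [hproj, hmain, hsym, hruns]
      · have hb : (m == (-1 : Int)) = false := by simp [hm]
        have hb' : (m != (-1 : Int)) = true := by simp [hm]
        have hstep : pvAStep seq_len ((-1 : Int), (0 : Int), ([] : List String), (0 : Int), (0 : Int), true) (n, m)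
            = (m, 0, (if n > 0 then [PySem.Int.toStr n ++ "N"] else []), 0, 1, false) := by
          simp [pvAStep, hb]
        have hruns : (symsF (-1) ((n, m) :: rest)).foldl pvBGroup ([] : List (Char × Int))
            = runsAux 'M' 1 (symsF m rest) := by
          simp only [symsF, hb', if_true, List.foldl_cons, pvBGroup, List.getLast?_nil]
          simpa using groupFold (symsF m rest) [] 'M' 1
        have hproj := aFoldProj seq_len rest m 0 (if n > 0 then [PySem.Int.toStr n ++ "N"] else []) 0 1
        have hmain := (mainRun seq_len (symsF m rest) (symsF_DM m rest) 1 0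
          (if n > 0 then [PySem.Int.toStr n ++ "N"] else []) (by omega)).2
        simp only [to_cigar, to_cigar_alt, List.foldl_cons, hstep]
        simp only at hproj
        rw [hproj, hmain, hsym, hruns]
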